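-- pv_equiv track=rewrite | github.com/god-bot420/Exercise-Tracker | main.py | check_dropdown_click
-- ===== SOURCE A (Python) =====
-- def check_dropdown_click(x, y, modes, dropdown_open, frame_width):
--     """Check if a dropdown item was clicked."""
--     dropdown_x_start = frame_width - 210
--     dropdown_x_end = frame_width - 10
--     dropdown_y_start = 10
--     dropdown_y_end = 50
--
--     if dropdown_x_start <= x <= dropdown_x_end:  # Within dropdown width
--         if dropdown_y_start <= y <= dropdown_y_end:  # Dropdown button
--             return "toggle"
--         if dropdown_open:
--             for i, mode in enumerate(modes):
--                 y_start = dropdown_y_end + i * 40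
--                 y_end = y_start + 40
--                 if y_start <= y <= y_end:
--                     return mode
--     return None
-- ===== SOURCE B (Python) =====
-- def check_dropdown_click(x, y, modes, dropdown_open, frame_width):
--     """Check if a dropdown item was clicked."""
--     if not (frame_width - 210 <= x <= frame_width - 10):
--         return None
--     if 10 <= y <= 50:
--         return "toggle"
--     if dropdown_open and 50 < y <= 50 + 40 * len(modes):
--         return modes[(y - 51) // 40]
--     return None
-- ===== Notes on version B (the rewrite author's own statement) =====
-- stated objective: alternative
-- what changed: Replaced the enumerate loop over dropdown bands with a direct arithmetic index (y-51)//40 into modes, keeping the x-range guard and toggle branch.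
import Mathlib
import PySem

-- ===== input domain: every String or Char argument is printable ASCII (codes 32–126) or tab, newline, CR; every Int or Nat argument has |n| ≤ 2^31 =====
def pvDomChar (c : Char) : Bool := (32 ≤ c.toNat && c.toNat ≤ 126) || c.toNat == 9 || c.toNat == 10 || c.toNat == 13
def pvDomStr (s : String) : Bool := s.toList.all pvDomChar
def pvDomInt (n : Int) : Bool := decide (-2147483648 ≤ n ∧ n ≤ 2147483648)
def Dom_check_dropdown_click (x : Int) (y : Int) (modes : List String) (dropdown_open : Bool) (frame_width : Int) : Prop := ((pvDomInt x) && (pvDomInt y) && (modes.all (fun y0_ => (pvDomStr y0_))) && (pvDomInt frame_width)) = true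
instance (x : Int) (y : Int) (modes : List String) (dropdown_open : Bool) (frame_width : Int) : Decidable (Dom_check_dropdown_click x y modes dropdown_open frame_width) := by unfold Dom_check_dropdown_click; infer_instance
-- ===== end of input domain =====

-- B replaces A's scan over dropdown bands with a direct arithmetic index into modes (not measurably faster on the timed inputs).

-- ===== PORT A =====
-- the 'for i, mode in enumerate(modes)' loop, carrying the running index i
def cdcLoopA (y : Int) : Nat → List String → Option String
  | _, [] => none
  | i, m :: rest =>
    let y_start : Int := 50 + (i : Int) * 40
    let y_end : Int := y_start + 40
    if y_start ≤ y ∧ y ≤ y_end then some m else cdcLoopA y (i + 1) rest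

def check_dropdown_click (x : Int) (y : Int) (modes : List String) (dropdown_open : Bool) (frame_width : Int) : Option String :=
  let dropdown_x_start := frame_width - 210
  let dropdown_x_end := frame_width - 10
  if dropdown_x_start ≤ x ∧ x ≤ dropdown_x_end then
    if 10 ≤ y ∧ y ≤ 50 then some "toggle"
    else if dropdown_open then cdcLoopA y 0 modes
    else none
  else none

-- ===== PORT B =====
def check_dropdown_click_alt (x : Int) (y : Int) (modes : List String) (dropdown_open : Bool) (frame_width : Int) : Option String :=
  if ¬ (frame_width - 210 ≤ x ∧ x ≤ frame_width - 10) then none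
  else if 10 ≤ y ∧ y ≤ 50 then some "toggle"
  else if dropdown_open ∧ 50 < y ∧ y ≤ 50 + 40 * (modes.length : Int) then
    -- modes[(y - 51) // 40]; the guard makes this index in range, so pyGet? is some here
    PySem.List.pyGet? modes (PySem.Int.floordiv (y - 51) 40)
  else none

-- ===== PRECONDITION & SPEC =====
def Spec_check_dropdown_click (x : Int) (y : Int) (modes : List String) (dropdown_open : Bool) (frame_width : Int) (out : Option String) : Prop := out = check_dropdown_click_alt x y modes dropdown_open frame_width
instance (x : Int) (y : Int) (modes : List String) (dropdown_open : Bool) (frame_width : Int) (out : Option String) : Decidable (Spec_check_dropdown_click x y modes dropdown_open frame_width out) := by unfold Spec_check_dropdown_click; infer_instance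

-- ===== CLAIM (what is proved, stated in full; the proofs are below) =====
def Claim_equal_check_dropdown_click : Prop := ∀ (x : Int) (y : Int) (modes : List String) (dropdown_open : Bool) (frame_width : Int), Dom_check_dropdown_click x y modes dropdown_open frame_width → Spec_check_dropdown_click x y modes dropdown_open frame_width (check_dropdown_click x y modes dropdown_open frame_width)

-- ===== LEMMAS AND PROOFS =====

-- below every band: the loop finds nothing
theorem cdcLoopA_none_of_lt (y : Int) (l : List String) (i : Nat) (h : y < 50 + (i : Int) * 40) :
    cdcLoopA y i l = none := by
  induction l generalizing i with
  | nil => rfl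
  | cons m rest ih =>
    simp only [cdcLoopA]
    rw [if_neg (by push_cast; omega)]
    exact ih (i + 1) (by push_cast at h ⊢; omega)

-- above the first band's start: the loop returns element (y-51)//40 - i (first match wins at band boundaries)
theorem cdcLoopA_eq (y : Int) (l : List String) (i : Nat) (h : 50 + (i : Int) * 40 < y) :
    cdcLoopA y i l =
      (if y ≤ 50 + ((i : Int) + l.length) * 40 then
        PySem.List.pyGet? l (PySem.Int.floordiv (y - 51) 40 - i) else none) := by
  induction l generalizing i with
  | nil => simp [cdcLoopA]; omega
  | cons m rest ih =>
    have h40 : (0:Int) < 40 := by norm_num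
    simp only [cdcLoopA, List.length_cons]
    push_cast
    by_cases hb : y ≤ 50 + (i : Int) * 40 + 40
    · rw [if_pos ⟨by omega, by omega⟩, if_pos (by omega)]
      have hk : PySem.Int.floordiv (y - 51) 40 = (i : Int) := by
        rw [PySem.Int.floordiv_eq_iff_of_pos h40]; omega
      rw [hk]
      simp [PySem.List.pyGet?, PySem.List.pyIdx?]
    · rw [if_neg (by omega), ih (i + 1) (by push_cast; omega)]
      push_cast
      have hk : (i : Int) + 1 ≤ PySem.Int.floordiv (y - 51) 40 := by
        rw [PySem.Int.le_floordiv_iff_mul_le] <;> omega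
      set k : Int := PySem.Int.floordiv (y - 51) 40 with hkdef
      split_ifs with h1 h2 h2
      · have ht : k - ((i : Int) + 1) = (((k - i - 1).toNat : Nat) : Int) := by omega
        have ht2 : k - (i : Int) = (((k - i - 1).toNat : Nat) : Int) + 1 := by omega
        rw [ht, ht2, PySem.List.pyGet?_cons_succ]
        norm_num
      · omega
      · omega
      · rfl

-- ===== VERDICT (by name: the statement is the Claim_ definition above) =====
theorem check_dropdown_click_spec : Claim_equal_check_dropdown_click := by
  intro x y modes dropdown_open frame_width _
  unfold Spec_check_dropdown_click check_dropdown_click check_dropdown_click_alt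
  by_cases hx : frame_width - 210 ≤ x ∧ x ≤ frame_width - 10
  · rw [if_pos hx, if_neg (not_not_intro hx)]
    by_cases hy : 10 ≤ y ∧ y ≤ 50
    · rw [if_pos hy, if_pos hy]
    · rw [if_neg hy, if_neg hy]
      cases dropdown_open with
      | false => simp
      | true =>
        rw [if_pos rfl]
        by_cases hgt : 50 < y
        · rw [cdcLoopA_eq y modes 0 (by push_cast; omega)]
          by_cases hle : y ≤ 50 + 40 * (modes.length : Int)
          · rw [if_pos (by push_cast; omega), if_pos ⟨rfl, hgt, hle⟩]
            norm_num
          · rw [if_neg (by push_cast; omega), if_neg (by rintro ⟨-, h1, h2⟩; omega)]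
        · rw [cdcLoopA_none_of_lt y modes 0 (by push_cast; omega),
              if_neg (by rintro ⟨-, h1, h2⟩; omega)]
  · rw [if_neg hx, if_pos hx]
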